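-- pv_equiv track=rewrite | github.com/kmanasi95/No_Pairs_Allowed | No_Pairs_Allowed.py | minimalOperations
-- ===== SOURCE A (Python) =====
-- import math
--
-- def minimalOperations(words):
--     result = []
--     i = 0
--
--     #Iterating over all words
--     for w in words:
--         x = 0
--         i = 0
--
--         while i < len(w):
--             count = 1
--             #To compare adjacent letters
--             for j in range(i+1, len(w)):
--                 if w[i] != w[j]:
--                     break
--                 else:
--                     count += 1
--
--             if count > 1:
--                 #This will determine the number of letters to be replaced
--                 x += math.floor(count / 2)
--                 i += count
--             else:
--                 i += 1
--
--         if x > 0: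
--             result.append(x)
--         else:
--             result.append(0)
--
--     return result
-- ===== SOURCE B (Python) =====
-- def minimalOperations(words):
--     result = []
--     for w in words:
--         total = 0
--         prev = None
--         run = 0
--         for c in w:
--             if c == prev:
--                 run += 1
--             else:
--                 total += run // 2
--                 prev = c
--                 run = 1
--         total += run // 2
--         result.append(total)
--     return result
-- ===== Notes on version B (the rewrite author's own statement) =====
-- stated objective: simpler
-- what changed: Replaced A's while loop with an inner re-scanning for-loop per run by a single flat pass per word that tracks the previous character and current run length, flushing run//2 on each character change and once after the loop.
import Mathlib
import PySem

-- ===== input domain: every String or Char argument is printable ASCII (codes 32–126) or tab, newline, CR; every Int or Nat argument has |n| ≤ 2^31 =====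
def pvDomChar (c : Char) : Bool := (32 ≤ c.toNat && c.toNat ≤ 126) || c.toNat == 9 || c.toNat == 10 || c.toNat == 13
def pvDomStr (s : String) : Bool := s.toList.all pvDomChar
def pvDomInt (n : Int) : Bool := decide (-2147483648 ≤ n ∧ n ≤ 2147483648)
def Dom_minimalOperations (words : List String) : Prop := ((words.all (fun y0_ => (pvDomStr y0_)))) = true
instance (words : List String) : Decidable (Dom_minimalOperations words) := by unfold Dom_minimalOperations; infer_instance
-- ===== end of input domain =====

-- B replaces A's while-loop with an inner re-scanning pass per run by one flat pass
-- per word tracking the previous character and the current run length (simpler).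

-- ===== PORT A =====
-- inner `for j in range(i+1, len(w))` loop of A: extra matches of w[i] from index j on
def pvRunA (cs : List Char) (ci : Char) (j : Nat) : Nat :=
  if h : j < cs.length then
    if cs[j] ≠ ci then 0 else 1 + pvRunA cs ci (j + 1)
  else 0
termination_by cs.length - j

-- A's `while i < len(w)` loop accumulating x
def pvLoopA (cs : List Char) (i : Nat) : Nat :=
  if h : i < cs.length then
    let count := 1 + pvRunA cs cs[i] (i + 1)
    if count > 1 then count / 2 + pvLoopA cs (i + count)
    else pvLoopA cs (i + 1)
  else 0
termination_by cs.length - i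
decreasing_by
  · omega
  · omega

def minimalOperations (words : List String) : List Int :=
  words.map (fun w =>
    let x := pvLoopA w.toList 0
    if x > 0 then (x : Int) else 0)

-- ===== PORT B =====
-- state: (total, prev, run); flush run / 2 on each character change and once at the end
def minimalOperations_alt (words : List String) : List Int :=
  words.map (fun w =>
    let s := w.toList.foldl
      (fun (st : Nat × Option Char × Nat) c =>
        if some c = st.2.1 then (st.1, st.2.1, st.2.2 + 1)
        else (st.1 + st.2.2 / 2, some c, 1))
      (0, none, 0)
    ((s.1 + s.2.2 / 2 : Nat) : Int))

-- ===== PRECONDITION & SPEC =====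
def Spec_minimalOperations (words : List String) (out : List Int) : Prop := out = minimalOperations_alt words
instance (words : List String) (out : List Int) : Decidable (Spec_minimalOperations words out) := by unfold Spec_minimalOperations; infer_instance

-- ===== CLAIM (what is proved, stated in full; the proofs are below) =====
def Claim_equal_minimalOperations : Prop := ∀ (words : List String), Dom_minimalOperations words → Spec_minimalOperations words (minimalOperations words)

-- ===== LEMMAS AND PROOFS =====

-- length of the maximal prefix of characters equal to c
def pvCP (c : Char) : List Char → Nat
  | [] => 0
  | d :: t => if d = c then 1 + pvCP c t else 0

-- common reference function: sum of ⌊run length / 2⌋ over the maximal runs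
def pvG : List Char → Nat
  | [] => 0
  | c :: t => (1 + pvCP c t) / 2 + pvG (t.drop (pvCP c t))
termination_by l => l.length
decreasing_by simp

theorem pvRunA_eq (cs : List Char) (ci : Char) (j : Nat) :
    pvRunA cs ci j = pvCP ci (cs.drop j) := by
  fun_induction pvRunA cs ci j with
  | case1 j h hne =>
      rw [List.drop_eq_getElem_cons h]
      simp at hne
      simp [pvCP, hne]
  | case2 j h hne ih =>
      rw [List.drop_eq_getElem_cons h]
      simp at hne
      simp [pvCP, hne, ih]
  | case3 j h =>
      rw [List.drop_eq_nil_of_le (by omega)]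
      simp [pvCP]

theorem pvLoopA_eq (cs : List Char) (i : Nat) :
    pvLoopA cs i = pvG (cs.drop i) := by
  fun_induction pvLoopA cs i with
  | case1 i h count hgt ih =>
      rw [List.drop_eq_getElem_cons h]
      simp only [pvG]
      simp only [count, pvRunA_eq] at *
      have hd : (cs.drop (i + 1)).drop (pvCP cs[i] (cs.drop (i + 1)))
           = cs.drop (i + (1 + pvCP cs[i] (cs.drop (i + 1)))) := by
        rw [List.drop_drop]; ring_nf
      rw [hd]
      exact congrArg _ ih
  | case2 i h count hle ih =>
      rw [List.drop_eq_getElem_cons h]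
      simp only [pvG]
      simp only [count, pvRunA_eq] at *
      have h0 : pvCP cs[i] (cs.drop (i + 1)) = 0 := by omega
      simp [h0, ih]
  | case3 i h =>
      rw [List.drop_eq_nil_of_le (by omega)]
      simp [pvG]

-- value of B's run-flushing pass from an arbitrary mid-run state (prev = p, run = r)
def pvH (p : Char) (r : Nat) : List Char → Nat
  | [] => r / 2
  | c :: t => if c = p then pvH p (r + 1) t else r / 2 + pvH c 1 t

theorem pvH_eq (cs : List Char) : ∀ (p : Char) (r : Nat),
    pvH p r cs = (r + pvCP p cs) / 2 + pvG (cs.drop (pvCP p cs)) := by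
  induction cs with
  | nil => intro p r; simp [pvH, pvCP, pvG]
  | cons d t ih =>
      intro p r
      by_cases hd : d = p
      · subst hd
        simp only [pvH, pvCP, if_true]
        rw [ih d (r + 1),
            show (1 + pvCP d t) = pvCP d t + 1 by omega, List.drop_succ_cons,
            show r + 1 + pvCP d t = r + (pvCP d t + 1) by omega]
      · simp only [pvH, pvCP, if_neg hd]
        rw [ih d 1]
        have : pvG (d :: t) = (1 + pvCP d t) / 2 + pvG (t.drop (pvCP d t)) := by
          simp [pvG]
        simp [this]

theorem pvFoldB_eq (cs : List Char) : ∀ (t : Nat) (p : Char) (r : Nat),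
    (cs.foldl
      (fun (st : Nat × Option Char × Nat) c =>
        if some c = st.2.1 then (st.1, st.2.1, st.2.2 + 1)
        else (st.1 + st.2.2 / 2, some c, 1))
      (t, some p, r)).1
    + (cs.foldl
      (fun (st : Nat × Option Char × Nat) c =>
        if some c = st.2.1 then (st.1, st.2.1, st.2.2 + 1)
        else (st.1 + st.2.2 / 2, some c, 1))
      (t, some p, r)).2.2 / 2 = t + pvH p r cs := by
  induction cs with
  | nil => intro t p r; simp [pvH]
  | cons c cs ih =>
      intro t p r
      by_cases hc : c = p
      · subst hc
        simp only [List.foldl_cons, if_true, pvH]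
        exact ih t c (r + 1)
      · have hne : ¬ (some c = some p) := by simp [hc]
        simp only [List.foldl_cons, hne, if_false, pvH, if_neg hc]
        rw [ih (t + r / 2) c 1]; omega

theorem pvWordB_eq (cs : List Char) :
    (cs.foldl
      (fun (st : Nat × Option Char × Nat) c =>
        if some c = st.2.1 then (st.1, st.2.1, st.2.2 + 1)
        else (st.1 + st.2.2 / 2, some c, 1))
      (0, none, 0)).1
    + (cs.foldl
      (fun (st : Nat × Option Char × Nat) c =>
        if some c = st.2.1 then (st.1, st.2.1, st.2.2 + 1)
        else (st.1 + st.2.2 / 2, some c, 1))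
      (0, none, 0)).2.2 / 2 = pvG cs := by
  cases cs with
  | nil => simp [pvG]
  | cons c t =>
      have hne : ¬ (some c = (none : Option Char)) := by simp
      simp only [List.foldl_cons, hne, if_false, Nat.zero_div, Nat.add_zero]
      rw [pvFoldB_eq t 0 c 1, pvH_eq]
      simp [pvG]

-- ===== VERDICT (by name: the statement is the Claim_ definition above) =====
theorem minimalOperations_spec : Claim_equal_minimalOperations := by
  intro words _
  unfold Spec_minimalOperations minimalOperations minimalOperations_alt
  apply List.map_congr_left
  intro w _
  have hA : pvLoopA w.toList 0 = pvG w.toList := by simpa using pvLoopA_eq w.toList 0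
  have hB := pvWordB_eq w.toList
  show (if pvLoopA w.toList 0 > 0 then ((pvLoopA w.toList 0 : Nat) : Int) else 0) = _
  rw [hA]
  simp only []
  rw [hB]
  split <;> omega
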